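-- pv_equiv track=rewrite | github.com/sondresl/AdventOfCode | 2015/15.py | find_ratio
-- ===== SOURCE A (Python) =====
-- from operator import mul
-- from functools import reduce
-- from itertools import combinations_with_replacement, permutations
--
-- def create_perms(n):
--     for cuts in combinations_with_replacement(range(101), n):
--         if sum(cuts) == 100:
--             for p in permutations(cuts):
--                 yield p
--
-- def find_ratio(data, cals=False):
--     best = 0
--     for p in create_perms(len(data)):
--         new = list(map(sum, map(list, zip(*[value(i, v) for i, v in zip(data, p)]))))
--         if any(i <= 0 for i in new):
--             continue
--         if cals:
--             if new[-1] != 500: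
--                 continue
--         s = reduce(mul, new[:-1])
--         if s > best:
--             best = s
--     return best
--
-- def value(ingredient, ratio):
--     return [ratio * i for i in tuple(ingredient)]
-- ===== SOURCE B (Python) =====
-- def find_ratio(data, cals=False):
--     m = min((len(r) for r in data), default=0)
--     best = 0
--
--     def score(totals):
--         nonlocal best
--         if any(t <= 0 for t in totals):
--             return
--         if cals and totals[-1] != 500:
--             return
--         s = 1
--         for t in totals[:-1]:
--             s *= t
--         if s > best:
--             best = s
--
--     def go(rows, remaining, totals):
--         if not rows:
--             if remaining == 0:
--                 score(totals)
--             return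
--         row = rows[0]
--         rest = rows[1:]
--         if not rest:
--             # last ingredient must take the whole remainder
--             go(rest, 0, [t + remaining * x for t, x in zip(totals, row)])
--             return
--         for amt in range(remaining + 1):
--             go(rest, remaining - amt, [t + amt * x for t, x in zip(totals, row)])
--
--     go(data, 100, [0] * m)
--     return best
-- ===== Notes on version B (the rewrite author's own statement) =====
-- stated objective: faster
-- what changed: A enumerates all sorted 101-ary tuples via combinations_with_replacement and then every permutation of each (transposing the scaled rows per candidate); B recursively enumerates the compositions of 100 into len(data) nonnegative parts directly, forcing the last ingredient to take the remainder and accumulating the nutrition totals incrementally, so the n! permutation layer and the full C(100+n,n) scan disappear; intended as faster, measured 3.46x at the largest size on which both finish (for very many ingredients both searches are infeasible).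
-- outside the precondition, e.g. on find_ratio([[1, 2], [3]], False): A raises TypeError, B returns 1; on find_ratio([[1]], True): A returns 0, B returns 0
import Mathlib
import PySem

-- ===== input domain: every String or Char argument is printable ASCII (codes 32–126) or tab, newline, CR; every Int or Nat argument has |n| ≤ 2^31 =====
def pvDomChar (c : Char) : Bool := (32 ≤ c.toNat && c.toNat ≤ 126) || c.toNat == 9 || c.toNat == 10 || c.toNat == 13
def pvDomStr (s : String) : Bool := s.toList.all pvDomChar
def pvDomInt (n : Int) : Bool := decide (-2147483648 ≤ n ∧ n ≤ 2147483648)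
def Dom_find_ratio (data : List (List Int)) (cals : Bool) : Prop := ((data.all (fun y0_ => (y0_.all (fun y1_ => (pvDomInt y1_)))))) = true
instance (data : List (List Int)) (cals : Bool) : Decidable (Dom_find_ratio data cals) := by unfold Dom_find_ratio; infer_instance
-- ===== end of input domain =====

-- B replaces A's "all sorted tuples × all their permutations" search by a direct recursive
-- enumeration of the compositions of 100 that accumulates the nutrition totals as it goes
-- (objective: intended as faster — the permutation layer disappears; measured 3.46x at the
-- largest size on which both finish).

-- ===== PORT A =====

-- helper `value(ingredient, ratio)` of A
def pvValue (ingredient : List Int) (ratio : Int) : List Int :=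
  ingredient.map (fun i => ratio * i)

-- termination helpers for the hand-port of Python's zip(*rows) (not covered by PySem)
theorem pvTailLenSum_le (rows : List (List Int)) :
    ((rows.map (fun r => r.tail)).map List.length).sum ≤ (rows.map List.length).sum := by
  induction rows with
  | nil => simp
  | cons r rest ih =>
      simp only [List.map_cons, List.sum_cons]
      have : r.tail.length ≤ r.length := by cases r <;> simp
      omega

theorem pvTailLenSum_lt (rows : List (List Int)) (h1 : rows ≠ [])
    (h2 : ∀ r ∈ rows, r ≠ []) :
    ((rows.map (fun r => r.tail)).map List.length).sum < (rows.map List.length).sum := by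
  cases rows with
  | nil => exact absurd rfl h1
  | cons r rest =>
      simp only [List.map_cons, List.sum_cons]
      have hr : r ≠ [] := h2 r (by simp)
      have : r.tail.length < r.length := by cases r with | nil => exact absurd rfl hr | cons a t => simp
      have := pvTailLenSum_le rest
      omega

-- Python zip(*rows): truncating transpose (exact: stops at the shortest row; zip() of no rows is empty)
def pvZipStar (rows : List (List Int)) : List (List Int) :=
  if h1 : rows = [] then []
  else if h2 : rows.any (fun r => r.isEmpty) then []
  else (rows.map (fun r => r.headI)) :: pvZipStar (rows.map (fun r => r.tail))
termination_by (rows.map List.length).sum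
decreasing_by
  rw [List.attach_map_val (l := rows) (f := fun r => r.tail)]
  apply pvTailLenSum_lt rows h1
  intro r hr
  simp only [List.any_eq_true, not_exists, not_and] at h2
  have := h2 r hr
  simpa [List.isEmpty_iff] using this

-- itertools.combinations_with_replacement(pool, n), in its lexicographic production order
def pvCwr (pool : List Int) (n : Nat) : List (List Int) :=
  match n, pool with
  | 0, _ => [[]]
  | _ + 1, [] => []
  | n + 1, x :: xs => ((pvCwr (x :: xs) n).map (fun c => x :: c)) ++ pvCwr xs (n + 1)
termination_by (n, pool.length)

-- generator create_perms(n) of A, materialised as the list of yielded tuples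
def pvCreatePerms (n : Nat) : List (List Int) :=
  ((pvCwr (PySem.List.pyRange 0 101) n).filter (fun c => c.sum == 100)).flatMap
    (fun c => PySem.List.permutations c c.length)

-- `s = reduce(mul, new[:-1]); if s > best: best = s` — reduce raises TypeError on an empty
-- list (excluded by Pre_), mirrored by the `[]` branch returning `best` arbitrarily
def pvReduceStep (new : List Int) (best : Int) : Int :=
  match PySem.List.slice new none (some (-1)) with
  | [] => best
  | x :: xs => let s := xs.foldl (· * ·) x; if s > best then s else best

-- the body of A's loop after `new` is computed
def pvScoreA (cals : Bool) (new : List Int) (best : Int) : Int :=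
  if new.any (fun i => i ≤ 0) then best
  else if cals then
    match PySem.List.pyGet? new (-1) with
    | none => best   -- Python: IndexError on new[-1] (excluded by Pre_)
    | some last => if last ≠ 500 then best else pvReduceStep new best
  else pvReduceStep new best

def find_ratio (data : List (List Int)) (cals : Bool) : Int :=
  (pvCreatePerms data.length).foldl
    (fun best p =>
      let new := (pvZipStar ((data.zip p).map (fun iv => pvValue iv.1 iv.2))).map List.sum
      pvScoreA cals new best)
    0

-- ===== PORT B =====

-- `s = 1; for t in totals[:-1]: s *= t; if s > best: best = s`
def pvScoreMul (totals : List Int) (best : Int) : Int :=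
  let s := (PySem.List.slice totals none (some (-1))).foldl (· * ·) 1
  if s > best then s else best

-- B's score(totals)
def pvScore (cals : Bool) (totals : List Int) (best : Int) : Int :=
  if totals.any (fun t => t ≤ 0) then best
  else if cals then
    match PySem.List.pyGet? totals (-1) with
    | none => best   -- Python: IndexError on totals[-1] (excluded by Pre_)
    | some last => if last ≠ 500 then best else pvScoreMul totals best
  else pvScoreMul totals best

-- `[t + amt * x for t, x in zip(totals, row)]`
def pvAddRow (totals : List Int) (amt : Int) (row : List Int) : List Int :=
  (totals.zip row).map (fun tx => tx.1 + amt * tx.2)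

-- B's recursive composition enumerator go(rows, remaining, totals), best threaded through
def pvGo (cals : Bool) : List (List Int) → Int → List Int → Int → Int
  | [], remaining, totals, best =>
      if remaining = 0 then pvScore cals totals best else best
  | row :: rest, remaining, totals, best =>
      if rest.isEmpty then pvGo cals rest 0 (pvAddRow totals remaining row) best
      else
        (PySem.List.pyRange 0 (remaining + 1)).foldl
          (fun b amt => pvGo cals rest (remaining - amt) (pvAddRow totals amt row) b) best

def find_ratio_alt (data : List (List Int)) (cals : Bool) : Int :=
  let m := (PySem.List.minD (data.map (fun r => (r.length : Int))) (fun x => x) 0).toNat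
  pvGo cals data 100 (List.replicate m 0) 0

-- ===== PRECONDITION & SPEC =====
-- Pre_ admits the empty dataset, any dataset whose rows all have at least two entries, and any
-- dataset of nonempty rows whose first entries are all nonpositive (every candidate is filtered
-- out, both programs return 0); it excludes the remaining short-row datasets, where A raises
-- (IndexError on new[-1] / TypeError in reduce(mul, ...)) on any candidate that reaches the
-- scoring step, and returns a value only when no candidate happens to reach it.
def Pre_find_ratio (data : List (List Int)) (cals : Bool) : Prop :=
  data = [] ∨ (∀ r ∈ data, 2 ≤ r.length) ∨
    ((∀ r ∈ data, 1 ≤ r.length) ∧ (∀ r ∈ data, r.getD 0 0 ≤ 0))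
instance (data : List (List Int)) (cals : Bool) : Decidable (Pre_find_ratio data cals) := by
  unfold Pre_find_ratio; infer_instance

def pvWitness_find_ratio : List (List Int) × Bool := ([[1, 2], [3, 4]], false)

def Spec_find_ratio (data : List (List Int)) (cals : Bool) (out : Int) : Prop := out = find_ratio_alt data cals
instance (data : List (List Int)) (cals : Bool) (out : Int) : Decidable (Spec_find_ratio data cals out) := by unfold Spec_find_ratio; infer_instance

-- ===== CLAIM (what is proved, stated in full; the proofs are below) =====
def Claim_equal_find_ratio : Prop := ∀ (data : List (List Int)) (cals : Bool), Dom_find_ratio data cals → Pre_find_ratio data cals → Spec_find_ratio data cals (find_ratio data cals)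

-- ===== LEMMAS AND PROOFS =====

-- the contribution of one candidate tuple, as a pure function of its totals vector
def pvContrib (cals : Bool) (new : List Int) : Int :=
  if new.any (fun i => i ≤ 0) then 0
  else if cals && (new.getLast?.getD 0 != 500) then 0
  else new.dropLast.foldl (· * ·) 1

-- column sum Σᵢ pᵢ * rowᵢ[j]
def pvColSum (rows : List (List Int)) (p : List Int) (j : Nat) : Int :=
  ((rows.zip p).map (fun rv => rv.2 * rv.1.getD j 0)).sum

-- all compositions of rem into k nonnegative parts
def pvComps : Nat → Int → List (List Int)
  | 0, rem => if rem = 0 then [[]] else []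
  | k + 1, rem =>
      (PySem.List.pyRange 0 (rem + 1)).flatMap (fun a => (pvComps k (rem - a)).map (fun p => a :: p))

-- the totals vector produced by B's recursion for amounts p
def pvTotB (totals : List Int) (rows : List (List Int)) (p : List Int) : List Int :=
  (rows.zip p).foldl (fun acc rp => pvAddRow acc rp.2 rp.1) totals

-- minimum row length
def pvMinLen : List (List Int) → Nat
  | [] => 0
  | [r] => r.length
  | r :: rest => min r.length (pvMinLen rest)

-- unfolding equations of the well-founded pvCwr
theorem pvCwr_zero (pool : List Int) : pvCwr pool 0 = [[]] := by
  cases pool <;> rw [pvCwr]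

theorem pvCwr_cons (x : Int) (xs : List Int) (n : Nat) :
    pvCwr (x :: xs) (n + 1) = ((pvCwr (x :: xs) n).map (fun c => x :: c)) ++ pvCwr xs (n + 1) := by
  rw [pvCwr]

theorem pvMinLen_le (rows : List (List Int)) (r : List Int) (h : r ∈ rows) :
    pvMinLen rows ≤ r.length := by
  induction rows with
  | nil => simp at h
  | cons r0 rest ih =>
    cases rest with
    | nil =>
      simp only [List.mem_cons, List.not_mem_nil, or_false] at h
      subst h; simp [pvMinLen]
    | cons r2 rest2 =>
      rcases List.mem_cons.mp h with h1 | h2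
      · subst h1; simp only [pvMinLen]; exact min_le_left _ _
      · simp only [pvMinLen]; exact le_trans (min_le_right _ _) (ih h2)

theorem pvMinLen_mem (rows : List (List Int)) (h : rows ≠ []) :
    ∃ r ∈ rows, pvMinLen rows = r.length := by
  induction rows with
  | nil => exact absurd rfl h
  | cons r0 rest ih =>
    cases rest with
    | nil => exact ⟨r0, by simp, by simp [pvMinLen]⟩
    | cons r2 rest2 =>
      rcases le_total r0.length (pvMinLen (r2 :: rest2)) with hle | hle
      · exact ⟨r0, by simp, by simp only [pvMinLen]; omega⟩
      · obtain ⟨r, hr, he⟩ := ih (by simp)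
        exact ⟨r, List.mem_cons_of_mem _ hr, by simp only [pvMinLen]; omega⟩

theorem pvMinLen_ge (rows : List (List Int)) (k : Nat) (h : rows ≠ [])
    (hk : ∀ r ∈ rows, k ≤ r.length) : k ≤ pvMinLen rows := by
  obtain ⟨r, hr, he⟩ := pvMinLen_mem rows h
  rw [he]; exact hk r hr

-- generic: rewrite a foldl step under an invariant of the accumulator
theorem pvFoldlCongrInv {α : Type} (l : List α) (f g : Int → α → Int) (inv : Int → Prop)
    (h : ∀ b a, inv b → a ∈ l → f b a = g b a)
    (hp : ∀ b a, inv b → a ∈ l → inv (g b a)) :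
    ∀ b, inv b → l.foldl f b = l.foldl g b := by
  induction l with
  | nil => intro b _; rfl
  | cons a l ih =>
    intro b hb
    simp only [List.foldl_cons]
    rw [h b a hb (by simp)]
    exact ih (fun b x hb hx => h b x hb (by simp [hx]))
      (fun b x hb hx => hp b x hb (by simp [hx])) _ (hp b a hb (by simp))

theorem pvFoldlMax_cases {α : Type} (l : List α) (f : α → Int) :
    ∀ b, l.foldl (fun acc y => max acc (f y)) b = b ∨
      ∃ x ∈ l, l.foldl (fun acc y => max acc (f y)) b = f x := by
  induction l with
  | nil => intro b; left; rfl
  | cons a l ih =>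
    intro b
    simp only [List.foldl_cons]
    rcases ih (max b (f a)) with h | ⟨x, hx, he⟩
    · rcases max_choice b (f a) with hm | hm
      · left; rw [h, hm]
      · right; exact ⟨a, by simp, by rw [h, hm]⟩
    · right; exact ⟨x, by simp [hx], he⟩

theorem pvFoldlMax_eq_of_mem_iff {α : Type} (l₁ l₂ : List α) (f : α → Int) (b : Int)
    (h : ∀ x, x ∈ l₁ ↔ x ∈ l₂) :
    l₁.foldl (fun acc y => max acc (f y)) b = l₂.foldl (fun acc y => max acc (f y)) b := by
  apply le_antisymm
  · rcases pvFoldlMax_cases l₁ f b with h1 | ⟨x, hx, he⟩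
    · rw [h1]; exact (PySem.List.le_foldl_max_int l₂ f b).1
    · rw [he]; exact (PySem.List.le_foldl_max_int l₂ f b).2 x ((h x).mp hx)
  · rcases pvFoldlMax_cases l₂ f b with h1 | ⟨x, hx, he⟩
    · rw [h1]; exact (PySem.List.le_foldl_max_int l₁ f b).1
    · rw [he]; exact (PySem.List.le_foldl_max_int l₁ f b).2 x ((h x).mpr hx)

theorem pvScoreA_eq (cals : Bool) (new : List Int) (b : Int) (hb : 0 ≤ b)
    (hlen : 2 ≤ new.length) : pvScoreA cals new b = max b (pvContrib cals new) := by
  have hne : new ≠ [] := by intro hn; rw [hn] at hlen; simp at hlen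
  have hdlne : new.dropLast ≠ [] := by
    intro hd
    have h1 : new.dropLast.length = new.length - 1 := List.length_dropLast
    rw [hd] at h1; simp at h1; omega
  obtain ⟨x, xs, hdl⟩ := List.exists_cons_of_ne_nil hdlne
  have hred : pvReduceStep new b = max b (new.dropLast.foldl (· * ·) 1) := by
    simp only [pvReduceStep, PySem.List.slice_to_neg_one, hdl, List.foldl_cons, one_mul]
    split_ifs with hs
    · exact (max_eq_right hs.le).symm
    · exact (max_eq_left (not_lt.mp hs)).symm
  have hlast : PySem.List.pyGet? new (-1) = some (new.getLast hne) := by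
    rw [PySem.List.pyGet?_neg_one, List.getLast?_eq_getLast hne]
  have hlastD : new.getLast?.getD 0 = new.getLast hne := by
    rw [List.getLast?_eq_getLast hne]; rfl
  by_cases hany : new.any (fun i => i ≤ 0) = true
  · simp [pvScoreA, pvContrib, hany, max_eq_left hb]
  · cases cals with
    | false =>
      simp only [pvScoreA, pvContrib, hany, if_neg, Bool.false_eq_true, if_false,
        Bool.false_and]
      exact hred
    | true =>
      simp only [pvScoreA, pvContrib, hany, Bool.false_eq_true, if_false, if_true, hlast,
        Bool.true_and, hlastD]
      by_cases h500 : new.getLast hne = 500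
      · simp only [h500, ne_eq, not_true_eq_false, if_false, bne_self_eq_false,
          Bool.false_eq_true]
        simpa using hred
      · simp only [ne_eq, h500, not_false_eq_true, if_true, bne_iff_ne, if_pos h500]
        exact (max_eq_left hb).symm

theorem pvScoreB_eq (cals : Bool) (new : List Int) (b : Int) (hb : 0 ≤ b)
    (hlen : 2 ≤ new.length) : pvScore cals new b = max b (pvContrib cals new) := by
  have hne : new ≠ [] := by intro hn; rw [hn] at hlen; simp at hlen
  have hred : pvScoreMul new b = max b (new.dropLast.foldl (· * ·) 1) := by
    simp only [pvScoreMul, PySem.List.slice_to_neg_one]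
    split_ifs with hs
    · exact (max_eq_right hs.le).symm
    · exact (max_eq_left (not_lt.mp hs)).symm
  have hlast : PySem.List.pyGet? new (-1) = some (new.getLast hne) := by
    rw [PySem.List.pyGet?_neg_one, List.getLast?_eq_getLast hne]
  have hlastD : new.getLast?.getD 0 = new.getLast hne := by
    rw [List.getLast?_eq_getLast hne]; rfl
  by_cases hany : new.any (fun i => i ≤ 0) = true
  · simp [pvScore, pvContrib, hany, max_eq_left hb]
  · cases cals with
    | false =>
      simp only [pvScore, pvContrib, hany, Bool.false_eq_true, if_false, Bool.false_and]
      exact hred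
    | true =>
      simp only [pvScore, pvContrib, hany, Bool.false_eq_true, if_false, if_true, hlast,
        Bool.true_and, hlastD]
      by_cases h500 : new.getLast hne = 500
      · simp only [h500, ne_eq, not_true_eq_false, if_false, bne_self_eq_false,
          Bool.false_eq_true]
        simpa using hred
      · simp only [ne_eq, h500, not_false_eq_true, if_true, bne_iff_ne, if_pos h500]
        exact (max_eq_left hb).symm

-- membership characterisation of pvComps
theorem pvComps_mem : ∀ (k : Nat) (rem : Int) (p : List Int),
    p ∈ pvComps k rem ↔ (p.length = k ∧ (∀ x ∈ p, 0 ≤ x) ∧ p.sum = rem) := by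
  intro k
  induction k with
  | zero =>
    intro rem p
    constructor
    · intro hp
      by_cases hr : rem = 0
      · subst hr
        have hp' : p = [] := by simpa [pvComps] using hp
        subst hp'; exact ⟨rfl, by simp, by simp⟩
      · exfalso; simp [pvComps, hr] at hp
    · rintro ⟨hl, _, hs⟩
      have hp' : p = [] := List.length_eq_zero_iff.mp hl
      subst hp'
      have hr : rem = 0 := by simpa using hs.symm
      subst hr
      simp [pvComps]
  | succ k ih =>
    intro rem p
    simp only [pvComps, List.mem_flatMap, List.mem_map, PySem.List.mem_pyRange_one]
    constructor
    · rintro ⟨a, ⟨ha0, halt⟩, q, hq, rfl⟩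
      obtain ⟨hl, hnn, hs⟩ := (ih _ _).mp hq
      refine ⟨by simp [hl], ?_, by simp [hs]⟩
      intro x hx
      rcases List.mem_cons.mp hx with rfl | hx
      · exact ha0
      · exact hnn x hx
    · rintro ⟨hl, hnn, hs⟩
      cases p with
      | nil => simp at hl
      | cons a q =>
        have ha0 : 0 ≤ a := hnn a (by simp)
        have hq0 : 0 ≤ q.sum := List.sum_nonneg (fun x hx => hnn x (by simp [hx]))
        have hs' : a + q.sum = rem := by simpa using hs
        exact ⟨a, ⟨ha0, by omega⟩, q,
          (ih _ _).mpr ⟨by simpa using hl, fun x hx => hnn x (by simp [hx]), by omega⟩, rfl⟩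

-- cwr members: right length, entries from the pool
theorem pvCwr_mem_props : ∀ (pool : List Int) (n : Nat) (c : List Int), c ∈ pvCwr pool n →
    c.length = n ∧ ∀ x ∈ c, x ∈ pool := by
  intro pool n
  fun_induction pvCwr pool n with
  | case1 pool =>
    intro c hc
    simp only [List.mem_singleton] at hc
    subst hc; simp
  | case2 n =>
    intro c hc
    simp at hc
  | case3 n x xs ih1 ih2 =>
    intro c hc
    rcases List.mem_append.mp hc with hc | hc
    · obtain ⟨c', hc', rfl⟩ := List.mem_map.mp hc
      obtain ⟨hl, hm⟩ := ih1 c' hc'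
      refine ⟨by simp [hl], ?_⟩
      intro y hy
      rcases List.mem_cons.mp hy with rfl | hy
      · exact List.mem_cons_self
      · exact hm y hy
    · obtain ⟨hl, hm⟩ := ih2 c hc
      exact ⟨hl, fun y hy => List.mem_cons_of_mem _ (hm y hy)⟩

-- completeness of cwr over a range pool for sorted lists
theorem pvCwr_complete : ∀ (K : Nat) (a : Int) (c : List Int),
    c.length + (101 - a).toNat ≤ K → (∀ x ∈ c, a ≤ x ∧ x < 101) →
    c.Pairwise (· ≤ ·) → c ∈ pvCwr (PySem.List.pyRange a 101) c.length := by
  intro K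
  induction K with
  | zero =>
    intro a c hK hmem _
    have hc : c = [] := by
      cases c with
      | nil => rfl
      | cons y t => simp at hK
    subst hc
    simp only [List.length_nil]
    rw [pvCwr_zero]; simp
  | succ K ih =>
    intro a c hK hmem hpair
    cases c with
    | nil =>
      simp only [List.length_nil]
      rw [pvCwr_zero]; simp
    | cons x t =>
      have hx := hmem x (by simp)
      have ha : a < 101 := by omega
      have hrange : PySem.List.pyRange a 101 = a :: PySem.List.pyRange (a + 1) 101 :=
        PySem.List.pyRange_one_cons ha
      rw [hrange]
      show x :: t ∈ pvCwr (a :: PySem.List.pyRange (a + 1) 101) (t.length + 1)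
      rw [pvCwr_cons]
      by_cases hxa : x = a
      · subst hxa
        have ht : t ∈ pvCwr (PySem.List.pyRange x 101) t.length := by
          apply ih x t (by simp at hK ⊢; omega)
            (fun y hy => hmem y (by simp [hy]))
            ((List.pairwise_cons.mp hpair).2)
        rw [hrange] at ht
        exact List.mem_append_left _ (List.mem_map.mpr ⟨t, ht, rfl⟩)
      · have hax : a + 1 ≤ x := by rcases hx with ⟨h1, _⟩; omega
        have hall : ∀ y ∈ x :: t, a + 1 ≤ y ∧ y < 101 := by
          intro y hy
          rcases List.mem_cons.mp hy with rfl | hy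
          · exact ⟨hax, hx.2⟩
          · have h1 := hmem y (by simp [hy])
            have h2 := (List.pairwise_cons.mp hpair).1 y hy
            exact ⟨by omega, h1.2⟩
        have hKm : (x :: t).length + (101 - (a + 1)).toNat ≤ K := by
          simp at hK ⊢; omega
        exact List.mem_append_right _ (ih (a + 1) (x :: t) hKm hall hpair)

theorem pvPerms_succ (xs : List Int) (r : Nat) : PySem.List.permutations xs (r + 1) =
    List.flatMap (fun i =>
      match xs[i]? with
      | none => []
      | some x => List.map (fun p => x :: p) (PySem.List.permutations (xs.eraseIdx i) r)) (List.range xs.length) := by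
  rw [PySem.List.permutations]
  apply List.flatMap_congr
  intro i _
  rcases h : xs[i]? with _ | x <;> simp

theorem pvMem_permutations_of_perm : ∀ (p xs : List Int), p.Perm xs →
    p ∈ PySem.List.permutations xs xs.length := by
  intro p
  induction p with
  | nil =>
    intro xs h
    have : xs = [] := List.Perm.eq_nil h.symm
    subst this
    decide
  | cons a q ih =>
    intro xs h
    have ha : a ∈ xs := h.subset List.mem_cons_self
    have hi : xs.idxOf a < xs.length := List.idxOf_lt_length_of_mem ha
    have hL : xs.length = (xs.erase a).length + 1 := by
      rw [List.length_erase_of_mem ha]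
      have : 0 < xs.length := List.length_pos_of_mem ha
      omega
    have hq : q.Perm (xs.erase a) := (List.cons_perm_iff_perm_erase.mp h).2
    have herase : xs.eraseIdx (xs.idxOf a) = xs.erase a := List.eraseIdx_idxOf_eq_erase a xs
    rw [hL, pvPerms_succ]
    apply List.mem_flatMap.mpr
    refine ⟨xs.idxOf a, by rw [List.mem_range]; exact hi, ?_⟩
    rw [List.getElem?_eq_getElem hi, List.getElem_idxOf]
    apply List.mem_map.mpr
    refine ⟨q, ?_, rfl⟩
    rw [herase]
    exact ih (xs.erase a) hq

theorem pvCreatePerms_mem (n : Nat) (p : List Int) :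
    p ∈ pvCreatePerms n ↔ (p.length = n ∧ (∀ x ∈ p, 0 ≤ x ∧ x ≤ 100) ∧ p.sum = 100) := by
  unfold pvCreatePerms
  simp only [List.mem_flatMap, List.mem_filter]
  constructor
  · rintro ⟨c, ⟨hcw, hsum⟩, hp⟩
    have hperm : p.Perm c := PySem.List.perm_of_mem_permutations hp
    obtain ⟨hlen, hpool⟩ := pvCwr_mem_props _ _ _ hcw
    have hsum' : c.sum = 100 := by simpa using hsum
    refine ⟨by rw [hperm.length_eq, hlen], ?_, by rw [hperm.sum_eq, hsum']⟩
    intro x hx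
    have := hpool x (hperm.subset hx)
    rw [PySem.List.mem_pyRange_one] at this
    exact ⟨this.1, by omega⟩
  · rintro ⟨hlen, hmem, hsum⟩
    refine ⟨PySem.List.sorted p (fun x : Int => x) false, ⟨?_, ?_⟩, ?_⟩
    · have hperm := PySem.List.sorted_perm p (fun x : Int => x) false
      have hcl : (PySem.List.sorted p (fun x : Int => x) false).length = p.length :=
        PySem.List.length_sorted p _ false
      have hcw := pvCwr_complete ((PySem.List.sorted p (fun x : Int => x) false).length + 101) 0
        (PySem.List.sorted p (fun x : Int => x) false)
        (by omega)
        (fun x hx => by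
          have := hmem x ((PySem.List.mem_sorted p _ false x).mp hx)
          exact ⟨this.1, by omega⟩)
        (PySem.List.sorted_pairwise p (fun x : Int => x))
      rw [hcl, hlen] at hcw
      exact hcw
    · have hperm := PySem.List.sorted_perm p (fun x : Int => x) false
      simp [hperm.sum_eq, hsum]
    · exact pvMem_permutations_of_perm p _ (PySem.List.sorted_perm p (fun x : Int => x) false).symm

theorem pvMinLen_map_tail : ∀ (rows : List (List Int)), rows ≠ [] → (∀ r ∈ rows, r ≠ []) →
    pvMinLen (rows.map (fun r => r.tail)) + 1 = pvMinLen rows := by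
  intro rows
  induction rows with
  | nil => intro h; exact absurd rfl h
  | cons r rest ih =>
    intro _ hne
    have hr := hne r (by simp)
    have hrl : r.tail.length + 1 = r.length := by
      cases r with
      | nil => exact absurd rfl hr
      | cons a t => simp
    cases rest with
    | nil =>
      simp only [List.map_cons, List.map_nil, pvMinLen]
      exact hrl
    | cons r2 rest2 =>
      have hih := ih (by simp) (fun r hr => hne r (by simp [hr]))
      simp only [List.map_cons, pvMinLen] at hih ⊢
      omega

-- characterisation of pvZipStar as an indexed transpose
theorem pvZipStar_char : ∀ (rows : List (List Int)), rows ≠ [] →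
    pvZipStar rows = (List.range (pvMinLen rows)).map (fun j => rows.map (fun r => r.getD j 0)) := by
  intro rows
  fun_induction pvZipStar rows with
  | case1 => intro h; exact absurd rfl h
  | case2 rs hne hany =>
    intro _
    simp only [List.any_eq_true] at hany
    obtain ⟨r, hr, hre⟩ := hany
    have hr0 : r = [] := List.isEmpty_iff.mp hre
    have hz : pvMinLen rs = 0 := by
      have := pvMinLen_le rs r hr
      rw [hr0] at this; simpa using this
    rw [hz]; simp
  | case3 rows h1 h2 ih =>
    intro _
    have hall : ∀ r ∈ rows, r ≠ [] := by
      intro r hr he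
      simp only [List.any_eq_true, not_exists, not_and] at h2
      exact (h2 r hr) (by rw [he]; rfl)
    have ih' : pvZipStar (rows.map (fun r => r.tail)) =
        (List.range (pvMinLen (rows.map (fun r => r.tail)))).map
          (fun j => (rows.map (fun r => r.tail)).map (fun r => r.getD j 0)) := by
      have hmt : rows.map (fun r => r.tail) ≠ [] := by
        simpa [List.map_eq_nil_iff] using h1
      simpa only [List.map_subtype, List.unattach_attach] using
        ih (by simpa only [List.map_subtype, List.unattach_attach] using hmt)
    have hm := pvMinLen_map_tail rows h1 hall
    rw [ih', ← hm, List.range_succ_eq_map]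
    simp only [List.map_cons, List.map_map]
    refine congrArg₂ List.cons ?_ ?_
    · apply List.map_congr_left
      intro r _
      cases r with
      | nil => rfl
      | cons a t => rfl
    · apply List.map_congr_left
      intro j _
      simp only [Function.comp, Nat.succ_eq_add_one, List.map_map]
      apply List.map_congr_left
      intro r _
      cases r with
      | nil => rfl
      | cons a t => rfl

theorem pvGetD_map_mul (r : List Int) (v : Int) (j : Nat) :
    (r.map (fun i => v * i)).getD j 0 = v * r.getD j 0 := by
  rw [List.getD_eq_getElem?_getD, List.getD_eq_getElem?_getD, List.getElem?_map]
  cases r[j]? <;> simp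

theorem pvSelf_range (l : List Int) : l = (List.range l.length).map (fun j => l.getD j 0) := by
  apply List.ext_getElem (by simp)
  intro i h1 h2
  simp only [List.getElem_map, List.getElem_range]
  rw [List.getD_eq_getElem _ _ h1]

theorem pvAddRow_length (acc row : List Int) (a : Int) (h : acc.length ≤ row.length) :
    (pvAddRow acc a row).length = acc.length := by
  simp [pvAddRow]; omega

theorem pvAddRow_getD (acc row : List Int) (a : Int) (j : Nat) (hj : j < acc.length)
    (h : acc.length ≤ row.length) :
    (pvAddRow acc a row).getD j 0 = acc.getD j 0 + a * row.getD j 0 := by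
  have hzl : j < (acc.zip row).length := by rw [List.length_zip]; omega
  unfold pvAddRow
  rw [List.getD_eq_getElem _ _ (by simpa using hzl)]
  simp only [List.getElem_map, List.getElem_zip]
  rw [List.getD_eq_getElem _ _ hj, List.getD_eq_getElem _ _ (by omega)]

theorem pvTotB_char : ∀ (rows : List (List Int)) (p totals : List Int),
    p.length = rows.length → (∀ r ∈ rows, totals.length ≤ r.length) →
    pvTotB totals rows p = (List.range totals.length).map (fun j => totals.getD j 0 + pvColSum rows p j) := by
  intro rows
  induction rows with
  | nil =>
    intro p totals hp _
    cases p with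
    | cons a q => simp at hp
    | nil => simpa [pvTotB, pvColSum] using pvSelf_range totals
  | cons row rest ih =>
    intro p totals hp hrl
    cases p with
    | nil => simp at hp
    | cons a q =>
      have hle : totals.length ≤ row.length := hrl row (by simp)
      have hlen : (pvAddRow totals a row).length = totals.length := pvAddRow_length _ _ _ hle
      have hstep : pvTotB totals (row :: rest) (a :: q) = pvTotB (pvAddRow totals a row) rest q := rfl
      rw [hstep, ih q _ (by simpa using hp)
        (fun r hr => by rw [hlen]; exact hrl r (by simp [hr])), hlen]
      apply List.map_congr_left
      intro j hj
      have hj' : j < totals.length := List.mem_range.mp hj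
      rw [pvAddRow_getD _ _ _ _ hj' hle]
      have hcs : pvColSum (row :: rest) (a :: q) j = a * row.getD j 0 + pvColSum rest q j := by
        simp [pvColSum]
      rw [hcs]; ring

theorem pvScaledLens : ∀ (data : List (List Int)) (p : List Int), p.length = data.length →
    ((data.zip p).map (fun iv => pvValue iv.1 iv.2)).map List.length = data.map List.length := by
  intro data
  induction data with
  | nil => intro p _; simp
  | cons d ds ih =>
    intro p hp
    cases p with
    | nil => simp at hp
    | cons a q =>
      simp only [List.zip_cons_cons, List.map_cons]
      refine congrArg₂ List.cons (by simp [pvValue]) ?_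
      simpa [Function.comp, pvValue] using ih q (by simpa using hp)

theorem pvMinLen_congr : ∀ (rows1 rows2 : List (List Int)),
    rows1.map List.length = rows2.map List.length → pvMinLen rows1 = pvMinLen rows2 := by
  intro rows1
  induction rows1 with
  | nil =>
    intro rows2 h
    cases rows2 with
    | nil => rfl
    | cons r rs => simp at h
  | cons r rest ih =>
    intro rows2 h
    cases rows2 with
    | nil => simp at h
    | cons r2 rest2 =>
      simp only [List.map_cons, List.cons.injEq] at h
      cases rest with
      | nil =>
        cases rest2 with
        | nil => simp [pvMinLen, h.1]
        | cons => simp at h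
      | cons rr rrest =>
        cases rest2 with
        | nil => simp at h
        | cons rr2 rrest2 =>
          simp only [pvMinLen]
          rw [h.1, ih _ h.2]

-- A's totals vector equals B's
theorem pvNewA_eq_totB (data : List (List Int)) (p : List Int) (h : p.length = data.length)
    (hne : data ≠ []) :
    (pvZipStar ((data.zip p).map (fun iv => pvValue iv.1 iv.2))).map List.sum =
      pvTotB (List.replicate (pvMinLen data) 0) data p := by
  have hlens := pvScaledLens data p h
  have hsne : ((data.zip p).map (fun iv => pvValue iv.1 iv.2)) ≠ [] := by
    intro he
    rw [he] at hlens
    cases data with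
    | nil => exact hne rfl
    | cons d ds => simp at hlens
  have hml : pvMinLen ((data.zip p).map (fun iv => pvValue iv.1 iv.2)) = pvMinLen data :=
    pvMinLen_congr _ _ hlens
  rw [pvZipStar_char _ hsne, hml,
    pvTotB_char data p _ h (fun r hr => by simp [pvMinLen_le data r hr]),
    List.map_map]
  simp only [List.length_replicate]
  apply List.map_congr_left
  intro j hj
  have hrep : (List.replicate (pvMinLen data) (0 : Int)).getD j 0 = 0 := by
    rw [List.getD_eq_getElem?_getD, List.getElem?_replicate]
    split_ifs <;> simp
  simp only [Function.comp, hrep, zero_add]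
  have : ((data.zip p).map (fun iv => pvValue iv.1 iv.2)).map (fun r => r.getD j 0) =
      (data.zip p).map (fun rv => rv.2 * rv.1.getD j 0) := by
    rw [List.map_map]
    apply List.map_congr_left
    intro rv _
    exact pvGetD_map_mul rv.1 rv.2 j
  rw [this]
  rfl

theorem pvComps_one (rem : Int) (h : 0 ≤ rem) : pvComps 1 rem = [[rem]] := by
  show (PySem.List.pyRange 0 (rem + 1)).flatMap
      (fun a => (pvComps 0 (rem - a)).map (fun p => a :: p)) = [[rem]]
  rw [PySem.List.pyRange_one_append 0 rem (rem + 1) h (by omega), List.flatMap_append]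
  have h1 : (PySem.List.pyRange 0 rem).flatMap
      (fun a => (pvComps 0 (rem - a)).map (fun p => a :: p)) = [] := by
    apply List.flatMap_eq_nil_iff.mpr
    intro a ha
    have := PySem.List.mem_pyRange_one.mp ha
    simp [pvComps, show rem - a ≠ 0 by omega]
  have h2 : PySem.List.pyRange rem (rem + 1) = [rem] := PySem.List.pyRange_one_singleton rem
  rw [h1, h2]
  simp [pvComps]

theorem pvGo_eq (cals : Bool) : ∀ (rows : List (List Int)) (rem : Int) (totals : List Int) (b : Int),
    0 ≤ b → 0 ≤ rem → 2 ≤ totals.length → (∀ r ∈ rows, totals.length ≤ r.length) →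
    pvGo cals rows rem totals b =
      (pvComps rows.length rem).foldl (fun b p => max b (pvContrib cals (pvTotB totals rows p))) b := by
  intro rows
  induction rows with
  | nil =>
    intro rem totals b hb hrem hlen _
    by_cases h : rem = 0
    · subst h
      simp only [pvGo, if_pos rfl, List.length_nil, pvComps, if_pos rfl, List.foldl_cons,
        List.foldl_nil]
      exact pvScoreB_eq cals totals b hb hlen
    · simp [pvGo, h, pvComps]
  | cons row rest ih =>
    intro rem totals b hb hrem hlen hrl
    have hle := hrl row (by simp)
    cases rest with
    | nil =>
      have hlhs : pvGo cals [row] rem totals b = pvScore cals (pvAddRow totals rem row) b := by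
        simp [pvGo]
      rw [hlhs]
      show _ = (pvComps 1 rem).foldl _ b
      rw [pvComps_one rem hrem]
      simp only [List.foldl_cons, List.foldl_nil]
      have htot : pvTotB totals [row] [rem] = pvAddRow totals rem row := rfl
      rw [htot]
      exact pvScoreB_eq cals _ b hb (by rw [pvAddRow_length _ _ _ hle]; exact hlen)
    | cons r2 rest2 =>
      have hstep : pvGo cals (row :: r2 :: rest2) rem totals b =
          (PySem.List.pyRange 0 (rem + 1)).foldl
            (fun b amt => pvGo cals (r2 :: rest2) (rem - amt) (pvAddRow totals amt row) b) b := by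
        simp [pvGo]
      rw [hstep]
      have hr : pvComps (row :: r2 :: rest2).length rem =
          (PySem.List.pyRange 0 (rem + 1)).flatMap
            (fun a => (pvComps (r2 :: rest2).length (rem - a)).map (fun p => a :: p)) := by
        simp [pvComps]
      rw [hr, List.foldl_flatMap]
      apply pvFoldlCongrInv _ _ _ (fun b => 0 ≤ b) ?_ ?_ b hb
      · intro b' a hb' ha
        obtain ⟨ha0, halt⟩ := PySem.List.mem_pyRange_one.mp ha
        rw [List.foldl_map]
        have hrec := ih (rem - a) (pvAddRow totals a row) b' hb' (by omega)
          (by rw [pvAddRow_length _ _ _ hle]; exact hlen)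
          (fun r hr => by rw [pvAddRow_length _ _ _ hle]; exact hrl r (by simp [hr]))
        rw [hrec]
        rfl
      · intro b' a hb' _
        exact le_trans hb' (PySem.List.le_foldl_max_int _ _ _).1

theorem pvMinD_eq (data : List (List Int)) (h : data ≠ []) :
    (PySem.List.minD (data.map (fun r => (r.length : Int))) (fun x => x) 0).toNat = pvMinLen data := by
  have hL : data.map (fun r => (r.length : Int)) ≠ [] := by simpa using h
  rcases hm : PySem.List.min? (data.map fun r => (r.length : Int)) (fun x => x) with _ | v
  · rw [PySem.List.min?_eq_none_iff] at hm
    exact absurd hm hL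
  · have hv := PySem.List.min?_mem hm
    obtain ⟨r, hr, hvr⟩ := List.mem_map.mp hv
    have hmin := PySem.List.min?_isMin hm
    have h1 : pvMinLen data ≤ r.length := pvMinLen_le data r hr
    obtain ⟨r0, hr0, he0⟩ := pvMinLen_mem data h
    have h2 : v ≤ (r0.length : Int) := hmin _ (List.mem_map_of_mem hr0)
    simp only [PySem.List.minD, hm, Option.getD_some]
    omega


theorem pvFoldlConst {α : Type} (l : List α) (f : Int → α → Int) (b : Int)
    (h : ∀ b' a, a ∈ l → f b' a = b') : l.foldl f b = b := by
  induction l generalizing b with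
  | nil => rfl
  | cons a l ih =>
    simp only [List.foldl_cons]
    rw [h b a (by simp)]
    exact ih _ (fun b' x hx => h b' x (by simp [hx]))

theorem pvSum_nonpos (l : List Int) (h : ∀ x ∈ l, x ≤ 0) : l.sum ≤ 0 := by
  induction l with
  | nil => simp
  | cons a t ih =>
    rw [List.sum_cons]
    have h1 := h a (by simp)
    have h2 := ih (fun x hx => h x (by simp [hx]))
    omega

theorem pvColSum_head_nonpos (data : List (List Int)) (p : List Int)
    (hpnn : ∀ x ∈ p, 0 ≤ x) (h0 : ∀ r ∈ data, r.getD 0 0 ≤ 0) :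
    pvColSum data p 0 ≤ 0 := by
  unfold pvColSum
  apply pvSum_nonpos
  intro x hx
  obtain ⟨rv, hrv, rfl⟩ := List.mem_map.mp hx
  obtain ⟨hr, hv⟩ := List.of_mem_zip hrv
  have h1 := hpnn rv.2 hv
  have h2 := h0 rv.1 hr
  have := mul_nonneg h1 (neg_nonneg.mpr h2)
  linarith

-- on datasets of nonempty rows whose first entries are all nonpositive, A filters out
-- every candidate and returns 0
theorem pvA_zero (data : List (List Int)) (cals : Bool) (hne : data ≠ [])
    (h1 : ∀ r ∈ data, 1 ≤ r.length) (h0 : ∀ r ∈ data, r.getD 0 0 ≤ 0) :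
    find_ratio data cals = 0 := by
  unfold find_ratio
  apply pvFoldlConst
  intro b p hp
  obtain ⟨hplen, hpr, _⟩ := (pvCreatePerms_mem _ _).mp hp
  show pvScoreA cals _ b = b
  rw [pvNewA_eq_totB data p hplen hne,
    pvTotB_char data p _ hplen (fun r hr => by simp [pvMinLen_le data r hr])]
  have hm1 : 1 ≤ pvMinLen data := pvMinLen_ge data 1 hne h1
  have hmem0 : (List.replicate (pvMinLen data) (0 : Int)).getD 0 0 + pvColSum data p 0 ∈
      (List.range (List.replicate (pvMinLen data) (0 : Int)).length).map
        (fun j => (List.replicate (pvMinLen data) (0 : Int)).getD j 0 + pvColSum data p j) :=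
    List.mem_map.mpr ⟨0, by simp; omega, rfl⟩
  have hrep0 : (List.replicate (pvMinLen data) (0 : Int)).getD 0 0 = 0 := by
    rw [List.getD_eq_getElem?_getD, List.getElem?_replicate]
    split_ifs <;> simp
  have hnp : pvColSum data p 0 ≤ 0 := pvColSum_head_nonpos data p (fun x hx => (hpr x hx).1) h0
  have hany : (((List.range (List.replicate (pvMinLen data) (0 : Int)).length).map
      (fun j => (List.replicate (pvMinLen data) (0 : Int)).getD j 0 + pvColSum data p j)).any
      (fun i => i ≤ 0)) = true := by
    rw [List.any_eq_true]
    exact ⟨_, hmem0, by rw [hrep0]; simpa using hnp⟩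
  unfold pvScoreA
  rw [if_pos hany]

theorem pvB_zero_go (cals : Bool) : ∀ (rows : List (List Int)) (rem : Int) (totals : List Int)
    (b : Int), 0 ≤ rem → totals ≠ [] → totals.getD 0 0 ≤ 0 →
    (∀ r ∈ rows, 1 ≤ r.length) → (∀ r ∈ rows, r.getD 0 0 ≤ 0) →
    pvGo cals rows rem totals b = b := by
  have hstep : ∀ (totals row : List Int) (a : Int), totals ≠ [] → row ≠ [] → 0 ≤ a →
      totals.getD 0 0 ≤ 0 → row.getD 0 0 ≤ 0 →
      pvAddRow totals a row ≠ [] ∧ (pvAddRow totals a row).getD 0 0 ≤ 0 := by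
    intro totals row a ht hr ha h0t h0r
    obtain ⟨t, ts, rfl⟩ := List.exists_cons_of_ne_nil ht
    obtain ⟨x, xs, rfl⟩ := List.exists_cons_of_ne_nil hr
    refine ⟨by simp [pvAddRow], ?_⟩
    show t + a * x ≤ 0
    simp only [List.getD_cons_zero] at h0t h0r
    have := mul_nonneg ha (neg_nonneg.mpr h0r)
    linarith
  intro rows
  induction rows with
  | nil =>
    intro rem totals b _ htne h0t _ _
    have hany : (totals.any (fun t => t ≤ 0)) = true := by
      rw [List.any_eq_true]
      obtain ⟨t, ts, rfl⟩ := List.exists_cons_of_ne_nil htne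
      exact ⟨t, by simp, by simpa using h0t⟩
    by_cases h : rem = 0 <;> simp [pvGo, h, pvScore, hany]
  | cons row rest ih =>
    intro rem totals b hrem htne h0t hlen h0
    have hrne : row ≠ [] := by
      intro hr
      have := hlen row (by simp)
      rw [hr] at this; simp at this
    have h0r : row.getD 0 0 ≤ 0 := h0 row (by simp)
    cases rest with
    | nil =>
      obtain ⟨hne', h0'⟩ := hstep totals row rem htne hrne hrem h0t h0r
      have : pvGo cals [row] rem totals b = pvGo cals [] 0 (pvAddRow totals rem row) b := by
        simp [pvGo]
      rw [this]
      exact ih 0 _ b le_rfl hne' h0' (by simp) (by simp)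
    | cons r2 rest2 =>
      have hexp : pvGo cals (row :: r2 :: rest2) rem totals b =
          (PySem.List.pyRange 0 (rem + 1)).foldl
            (fun b amt => pvGo cals (r2 :: rest2) (rem - amt) (pvAddRow totals amt row) b) b := by
        simp [pvGo]
      rw [hexp]
      apply pvFoldlConst
      intro b' a ha
      obtain ⟨ha0, _⟩ := PySem.List.mem_pyRange_one.mp ha
      obtain ⟨hne', h0'⟩ := hstep totals row a htne hrne ha0 h0t h0r
      exact ih (rem - a) _ b' (by
          have := PySem.List.mem_pyRange_one.mp ha; omega) hne' h0'
        (fun r hr => hlen r (by simp [hr])) (fun r hr => h0 r (by simp [hr]))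

-- B also returns 0 on those datasets
theorem pvB_zero (data : List (List Int)) (cals : Bool) (hne : data ≠ [])
    (h1 : ∀ r ∈ data, 1 ≤ r.length) (h0 : ∀ r ∈ data, r.getD 0 0 ≤ 0) :
    find_ratio_alt data cals = 0 := by
  unfold find_ratio_alt
  rw [pvMinD_eq data hne]
  have hm1 : 1 ≤ pvMinLen data := pvMinLen_ge data 1 hne h1
  apply pvB_zero_go cals data 100 _ 0 (by omega) (by simp; omega) ?_ h1 h0
  rw [List.getD_eq_getElem?_getD, List.getElem?_replicate]
  split_ifs <;> simp

-- ===== VERDICT (by name: the statement is the Claim_ definition above) =====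
theorem find_ratio_spec : Claim_equal_find_ratio := by
  intro data cals _ hpre
  unfold Spec_find_ratio
  by_cases hne : data = []
  · subst hne
    have h1 : find_ratio [] cals = 0 := by
      unfold find_ratio pvCreatePerms
      simp only [List.length_nil]
      rw [pvCwr_zero]
      simp [List.filter]
    have h2 : find_ratio_alt [] cals = 0 := by
      simp [find_ratio_alt, pvGo]
    rw [h1, h2]
  · by_cases hrows : ∀ r ∈ data, 2 ≤ r.length
    case neg =>
      have hz : (∀ r ∈ data, 1 ≤ r.length) ∧ (∀ r ∈ data, r.getD 0 0 ≤ 0) := by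
        rcases hpre with h | h | h
        · exact absurd h hne
        · exact absurd h hrows
        · exact h
      rw [pvA_zero data cals hne hz.1 hz.2, pvB_zero data cals hne hz.1 hz.2]
    case pos =>
      have hm2 : 2 ≤ pvMinLen data := pvMinLen_ge data 2 hne hrows
      have hmle : ∀ r ∈ data, pvMinLen data ≤ r.length := fun r hr => pvMinLen_le data r hr
      have hA : find_ratio data cals = (pvCreatePerms data.length).foldl
          (fun b p => max b (pvContrib cals (pvTotB (List.replicate (pvMinLen data) 0) data p))) 0 := by
        unfold find_ratio
        apply pvFoldlCongrInv _ _ _ (fun b => 0 ≤ b) ?_ ?_ 0 le_rfl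
        · intro b p hb hp
          have hplen : p.length = data.length := ((pvCreatePerms_mem _ _).mp hp).1
          have hnew := pvNewA_eq_totB data p hplen hne
          have hlen2 : (pvTotB (List.replicate (pvMinLen data) 0) data p).length = pvMinLen data := by
            rw [pvTotB_char data p _ hplen (fun r hr => by simp [hmle r hr])]
            simp
          show pvScoreA cals _ b = _
          rw [hnew, pvScoreA_eq cals _ b hb (by rw [hlen2]; omega)]
        · intro b p hb _
          exact le_trans hb (le_max_left _ _)
      have hsets : ∀ x, x ∈ pvCreatePerms data.length ↔ x ∈ pvComps data.length 100 := by
        intro x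
        rw [pvCreatePerms_mem, pvComps_mem]
        constructor
        · rintro ⟨h1, h2, h3⟩
          exact ⟨h1, fun y hy => (h2 y hy).1, h3⟩
        · rintro ⟨h1, h2, h3⟩
          refine ⟨h1, fun y hy => ⟨h2 y hy, ?_⟩, h3⟩
          have := List.single_le_sum h2 y hy
          omega
      have hB : pvGo cals data 100 (List.replicate (pvMinLen data) 0) 0 =
          (pvComps data.length 100).foldl
            (fun b p => max b (pvContrib cals (pvTotB (List.replicate (pvMinLen data) 0) data p))) 0 :=
        pvGo_eq cals data 100 _ 0 le_rfl (by omega) (by simpa using hm2)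
          (fun r hr => by simpa using hmle r hr)
      rw [hA, pvFoldlMax_eq_of_mem_iff _ _ _ _ hsets, ← hB]
      unfold find_ratio_alt
      rw [pvMinD_eq data hne]
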